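-- pv_equiv track=rewrite | github.com/A1pha3/ai-hedge-fund | scripts/replay_selection_target_calibration.py | _merge_candidate_entry_filter_observability
-- ===== SOURCE A (Python) =====
-- from collections import Counter
--
-- def _merge_candidate_entry_filter_observability(
--     aggregate_observability: dict[str, Counter[str]],
--     observability_sets: list[dict[str, Counter[str]]],
-- ) -> dict[str, Counter[str]]:
--     day_candidate_entry_filter_observability: dict[str, Counter[str]] = {}
--     for observability in observability_sets:
--         for rule_name, counters in observability.items():
--             aggregate_counters = aggregate_observability.setdefault(rule_name, Counter())
--             aggregate_counters.update(counters)
--             day_counters = day_candidate_entry_filter_observability.setdefault(rule_name, Counter())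
--             day_counters.update(counters)
--     return day_candidate_entry_filter_observability
-- ===== SOURCE B (Python) =====
-- from collections import Counter
--
-- def _merge_candidate_entry_filter_observability(
--     aggregate_observability: dict[str, Counter[str]],
--     observability_sets: list[dict[str, Counter[str]]],
-- ) -> dict[str, Counter[str]]:
--     # Pass 1: group the raw counters per rule name, preserving first-seen order.
--     groups: dict[str, list[Counter[str]]] = {}
--     for observability in observability_sets:
--         for rule_name, counters in observability.items():
--             groups.setdefault(rule_name, []).append(counters)
--     # Pass 2: merge each rule's counters into the day dict.
--     day_candidate_entry_filter_observability: dict[str, Counter[str]] = {}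
--     for rule_name, counter_list in groups.items():
--         merged: Counter[str] = Counter()
--         for counters in counter_list:
--             merged.update(counters)
--         day_candidate_entry_filter_observability[rule_name] = merged
--     # Pass 3: fold the finished per-day counters into the aggregate (in-place).
--     for rule_name, day_counter in day_candidate_entry_filter_observability.items():
--         if rule_name in aggregate_observability:
--             aggregate_observability[rule_name].update(day_counter)
--         else:
--             aggregate_observability[rule_name] = Counter(day_counter)
--     return day_candidate_entry_filter_observability
-- ===== Notes on version B (the rewrite author's own statement) =====
-- stated objective: alternative
-- what changed: Replaces A's single fused pass (which updates the aggregate and day dicts together per item) with three reshaped passes: group raw counters per rule name, merge each group once into the day dict, then fold the finished day counters into the aggregate, relying on counter addition being associative so the aggregate ends identical.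
import Mathlib
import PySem

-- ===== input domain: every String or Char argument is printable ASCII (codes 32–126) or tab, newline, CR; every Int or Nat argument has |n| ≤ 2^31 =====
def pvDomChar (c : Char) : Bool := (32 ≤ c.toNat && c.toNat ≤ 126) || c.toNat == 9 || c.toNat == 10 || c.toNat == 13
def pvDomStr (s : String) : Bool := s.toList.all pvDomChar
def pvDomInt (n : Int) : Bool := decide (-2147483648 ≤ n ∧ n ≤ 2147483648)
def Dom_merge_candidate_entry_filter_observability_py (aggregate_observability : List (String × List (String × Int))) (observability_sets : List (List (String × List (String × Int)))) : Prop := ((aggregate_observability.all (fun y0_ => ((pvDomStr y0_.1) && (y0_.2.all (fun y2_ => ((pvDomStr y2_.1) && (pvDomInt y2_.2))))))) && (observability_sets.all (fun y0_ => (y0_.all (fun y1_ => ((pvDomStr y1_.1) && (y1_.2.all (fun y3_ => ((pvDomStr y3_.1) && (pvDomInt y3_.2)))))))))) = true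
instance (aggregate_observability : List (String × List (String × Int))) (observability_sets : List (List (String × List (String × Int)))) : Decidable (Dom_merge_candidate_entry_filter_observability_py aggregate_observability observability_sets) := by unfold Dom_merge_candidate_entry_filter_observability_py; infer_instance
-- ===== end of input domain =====

-- B replaces A's fused per-item pass (which increments aggregate and day dicts together)
-- with three reshaped passes: group counters per rule, merge each group once, then fold
-- the finished day counters into the aggregate (objective: alternative decomposition).
-- A mutates aggregate_observability in place; B performs the same final mutation, and the
-- equivalence proved here is about the RETURN value (the per-day dict) only.

-- ===== PORT A =====
-- Counter.update(src): for k, v in src.items(): self[k] = self.get(k, 0) + v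
def pvUpdCounter (c : PySem.Dict String Int) (src : List (String × Int)) : PySem.Dict String Int :=
  src.foldl (fun d kv => d.modify kv.1 0 (fun n => n + kv.2)) c

def merge_candidate_entry_filter_observability_py (aggregate_observability : List (String × List (String × Int))) (observability_sets : List (List (String × List (String × Int)))) : List (String × List (String × Int)) :=
  -- boundary conversion of the aggregate dict-of-Counters argument
  let agg0 : PySem.Dict String (PySem.Dict String Int) :=
    PySem.Dict.mk (aggregate_observability.map (fun q => (q.1, PySem.Dict.mk q.2)))
  -- the fused loop: for obs in sets: for rule, counters in obs.items():
  --   agg.setdefault(rule, Counter()).update(counters); day.setdefault(rule, Counter()).update(counters)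
  -- (setdefault-then-update = Dict.modify with default empty)
  let st := observability_sets.foldl
    (fun (st : PySem.Dict String (PySem.Dict String Int) × PySem.Dict String (PySem.Dict String Int)) obs =>
      obs.foldl (fun st rc =>
        (st.1.modify rc.1 PySem.Dict.empty (fun c => pvUpdCounter c rc.2),
         st.2.modify rc.1 PySem.Dict.empty (fun c => pvUpdCounter c rc.2))) st)
    (agg0, PySem.Dict.empty)
  st.2.items.map (fun p => (p.1, p.2.items))

-- ===== PORT B =====
-- merged = Counter(); for counters in counter_list: merged.update(counters)
def pvMergeCounters (cs : List (List (String × Int))) : PySem.Dict String Int :=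
  cs.foldl (fun m c => pvUpdCounter m c) PySem.Dict.empty

def merge_candidate_entry_filter_observability_py_alt (aggregate_observability : List (String × List (String × Int))) (observability_sets : List (List (String × List (String × Int)))) : List (String × List (String × Int)) :=
  -- Pass 1: groups.setdefault(rule, []).append(counters)
  let groups : PySem.Dict String (List (List (String × Int))) :=
    observability_sets.foldl
      (fun g obs => obs.foldl (fun g rc => g.modify rc.1 [] (fun l => l ++ [rc.2])) g)
      PySem.Dict.empty
  -- Pass 2: day[rule] = merge of that rule's counter list
  let day : PySem.Dict String (PySem.Dict String Int) :=
    groups.items.foldl (fun d p => d.insert p.1 (pvMergeCounters p.2)) PySem.Dict.empty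
  -- Pass 3: if rule in aggregate: aggregate[rule].update(day_counter) else aggregate[rule] = Counter(day_counter)
  -- (in-place mutation of the argument; does not reach the return value)
  let _ := day.items.foldl
    (fun a p =>
      if a.contains p.1 then a.modify p.1 PySem.Dict.empty (fun c => pvUpdCounter c p.2.items)
      else a.insert p.1 (pvUpdCounter PySem.Dict.empty p.2.items))
    (PySem.Dict.mk (aggregate_observability.map (fun q => (q.1, PySem.Dict.mk q.2))))
  day.items.map (fun p => (p.1, p.2.items))

-- ===== PRECONDITION & SPEC =====
def Spec_merge_candidate_entry_filter_observability_py (aggregate_observability : List (String × List (String × Int))) (observability_sets : List (List (String × List (String × Int)))) (out : List (String × List (String × Int))) : Prop := out = merge_candidate_entry_filter_observability_py_alt aggregate_observability observability_sets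
instance (aggregate_observability : List (String × List (String × Int))) (observability_sets : List (List (String × List (String × Int)))) (out : List (String × List (String × Int))) : Decidable (Spec_merge_candidate_entry_filter_observability_py aggregate_observability observability_sets out) := by unfold Spec_merge_candidate_entry_filter_observability_py; infer_instance

-- ===== CLAIM (what is proved, stated in full; the proofs are below) =====
def Claim_equal_merge_candidate_entry_filter_observability_py : Prop := ∀ (aggregate_observability : List (String × List (String × Int))) (observability_sets : List (List (String × List (String × Int)))), Dom_merge_candidate_entry_filter_observability_py aggregate_observability observability_sets → Spec_merge_candidate_entry_filter_observability_py aggregate_observability observability_sets (merge_candidate_entry_filter_observability_py aggregate_observability observability_sets)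

-- ===== LEMMAS AND PROOFS =====

-- nested fold over a list of lists = fold over the flattening
theorem pv_foldl_nested_flatMap {β σ : Type} (f : σ → β → σ) (l : List (List β)) (s : σ) :
    l.foldl (fun s xs => xs.foldl f s) s = (l.flatMap id).foldl f s := by
  induction l generalizing s with
  | nil => rfl
  | cons xs rest ih => simp [List.foldl_cons, ih, List.foldl_append]

-- the day-dict value accumulated by A's fused loop, per key
theorem pv_getD_foldl_modify_upd (ps : List (String × List (String × Int)))
    (d : PySem.Dict String (PySem.Dict String Int)) (k : String) :
    (ps.foldl (fun d p => d.modify p.1 PySem.Dict.empty (fun c => pvUpdCounter c p.2)) d).getD k PySem.Dict.empty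
      = (ps.filter (fun p => p.1 == k)).foldl (fun c p => pvUpdCounter c p.2) (d.getD k PySem.Dict.empty) := by
  induction ps generalizing d with
  | nil => rfl
  | cons p rest ih =>
      simp only [List.foldl_cons, ih, List.filter_cons]
      by_cases h : p.1 = k
      · simp [h]
      · simp [h, PySem.Dict.getD_modify, Ne.symm h]

theorem merge_core_eq (observability_sets : List (List (String × List (String × Int)))) :
    (observability_sets.foldl
      (fun d obs => obs.foldl (fun d rc => d.modify rc.1 PySem.Dict.empty (fun c => pvUpdCounter c rc.2)) d)
      PySem.Dict.empty).items.map (fun p => (p.1, p.2.items))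
    = ((observability_sets.foldl
        (fun g obs => obs.foldl (fun g rc => g.modify rc.1 [] (fun l => l ++ [rc.2])) g)
        PySem.Dict.empty).items.foldl
          (fun d p => d.insert p.1 (pvMergeCounters p.2)) PySem.Dict.empty).items.map
        (fun p => (p.1, p.2.items)) := by
  set ps := observability_sets.flatMap id with hps
  have hA : (observability_sets.foldl
      (fun d obs => obs.foldl (fun d rc => d.modify rc.1 PySem.Dict.empty (fun c => pvUpdCounter c rc.2)) d)
      PySem.Dict.empty)
      = ps.foldl (fun d rc => d.modify rc.1 PySem.Dict.empty (fun c => pvUpdCounter c rc.2)) PySem.Dict.empty :=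
    pv_foldl_nested_flatMap _ _ _
  have hG : (observability_sets.foldl
      (fun g obs => obs.foldl (fun g rc => g.modify rc.1 [] (fun l => l ++ [rc.2])) g)
      PySem.Dict.empty)
      = ps.foldl (fun g rc => g.modify rc.1 [] (fun l => l ++ [rc.2])) PySem.Dict.empty :=
    pv_foldl_nested_flatMap _ _ _
  rw [hA, hG]
  set dayA := ps.foldl (fun d rc => d.modify rc.1 PySem.Dict.empty (fun c => pvUpdCounter c rc.2)) PySem.Dict.empty with hdA
  set groups := ps.foldl (fun g rc => g.modify rc.1 [] (fun l => l ++ [rc.2])) PySem.Dict.empty with hgr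
  -- keys coincide and are nodup
  have hkA : dayA.keys = PySem.Set.update ([] : List String) (ps.map (fun p => p.1)) := by
    rw [hdA]
    simpa using PySem.Dict.keys_foldl_modify_key ps (fun p => p.1) PySem.Dict.empty
      (fun _ p c => pvUpdCounter c p.2) PySem.Dict.empty
  have hkG : groups.keys = PySem.Set.update ([] : List String) (ps.map (fun p => p.1)) := by
    rw [hgr]
    simpa using PySem.Dict.keys_foldl_modify_key ps (fun p => p.1) [] (fun _ p l => l ++ [p.2]) PySem.Dict.empty
  have hndA : dayA.keys.Nodup := by
    rw [hdA]
    exact PySem.Dict.nodup_keys_foldl_modify_key ps (fun p => p.1) PySem.Dict.empty (fun _ p c => pvUpdCounter c p.2) _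
      (by simp)
  have hndG : groups.keys.Nodup := by
    rw [hgr]
    exact PySem.Dict.nodup_keys_foldl_modify_key ps (fun p => p.1) [] (fun _ p l => l ++ [p.2]) _
      (by simp)
  -- B's day dict items = groups items with each counter list merged
  have hB : ((groups.items.foldl (fun d p => d.insert p.1 (pvMergeCounters p.2)) PySem.Dict.empty)).items
      = groups.items.map (fun p => (p.1, pvMergeCounters p.2)) := by
    have := PySem.Dict.items_foldl_insert_fresh groups.items (fun p => p.1) (fun p => pvMergeCounters p.2)
      PySem.Dict.empty (fun a _ => by simp [PySem.Dict.contains_empty]) (by exact hndG)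
    simpa using this
  rw [hB]
  -- both sides as maps over the common key list
  rw [PySem.Dict.items_eq_map_keys dayA hndA PySem.Dict.empty,
      PySem.Dict.items_eq_map_keys groups hndG []]
  rw [hkA, hkG]
  simp only [List.map_map]
  apply List.map_congr_left
  intro k _
  simp only [Function.comp]
  congr 1
  -- per-key values agree
  have hval : dayA.getD k PySem.Dict.empty
      = pvMergeCounters ((ps.filter (fun p => p.1 == k)).map (fun p => p.2)) := by
    rw [hdA, pv_getD_foldl_modify_upd]
    simp [pvMergeCounters, List.foldl_map, PySem.Dict.getD_empty]
  have hgval : groups.getD k [] = (ps.filter (fun p => p.1 == k)).map (fun p => p.2) := by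
    rw [hgr]
    have := PySem.Dict.getD_foldl_modify_append ps PySem.Dict.empty k
    simpa [PySem.Dict.getD_empty] using this
  rw [hval, hgval]

-- A's pair-state fold projects to the pure day-dict fold on its second component
theorem pv_snd_foldl_pair (sets : List (List (String × List (String × Int))))
    (st : PySem.Dict String (PySem.Dict String Int) × PySem.Dict String (PySem.Dict String Int)) :
    (sets.foldl
      (fun st obs => obs.foldl (fun st rc =>
        (st.1.modify rc.1 PySem.Dict.empty (fun c => pvUpdCounter c rc.2),
         st.2.modify rc.1 PySem.Dict.empty (fun c => pvUpdCounter c rc.2))) st) st).2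
    = sets.foldl (fun d obs => obs.foldl (fun d rc => d.modify rc.1 PySem.Dict.empty (fun c => pvUpdCounter c rc.2)) d) st.2 := by
  induction sets generalizing st with
  | nil => rfl
  | cons obs rest ih =>
      obtain ⟨a, b⟩ := st
      simp only [List.foldl_cons]
      rw [PySem.List.foldl_prod_mk
        (fun a rc => PySem.Dict.modify a rc.1 PySem.Dict.empty (fun c => pvUpdCounter c rc.2))
        (fun d rc => PySem.Dict.modify d rc.1 PySem.Dict.empty (fun c => pvUpdCounter c rc.2)) obs a b]
      exact ih _

-- ===== VERDICT (by name: the statement is the Claim_ definition above) =====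
theorem merge_candidate_entry_filter_observability_py_spec : Claim_equal_merge_candidate_entry_filter_observability_py := by
  intro agg sets _
  unfold Spec_merge_candidate_entry_filter_observability_py
  simp only [merge_candidate_entry_filter_observability_py, merge_candidate_entry_filter_observability_py_alt]
  rw [pv_snd_foldl_pair]
  exact merge_core_eq sets
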